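-- pv_equiv track=rewrite | github.com/PawelBalawender/misc | Polynomial.py | get_coefficients
-- ===== SOURCE A (Python) =====
-- from typing import List, Tuple, Set
--
-- def get_coefficients(_pairs: List[tuple]) -> List[int]:
--     """
--     Take a sequence like [(coefficient, power of x)] and add zeros where are
--     they missing
--     """
--     _coefficients = []
--     power_counter = _pairs[0][1]  # highest coefficient
--     for pair in _pairs:
--         # add missing coefficients
--         while pair[1] != power_counter:
--             _coefficients += [0]
--             power_counter -= 1
--
--         # add actual coefficients
--         _coefficients += [pair[0]]
--         power_counter -= 1
--     return _coefficients
-- ===== SOURCE B (Python) =====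
-- def get_coefficients(_pairs):
--     """
--     Take a sequence like [(coefficient, power of x)] and add zeros where are
--     they missing
--     """
--     table = {p: c for c, p in _pairs}
--     highest = _pairs[0][1]
--     lowest = _pairs[-1][1]
--     return [table.get(p, 0) for p in range(highest, lowest - 1, -1)]
-- ===== Notes on version B (the rewrite author's own statement) =====
-- stated objective: idiomatic
-- what changed: Replaces A's decrementing power counter with inner zero-fill while-loop by building a power->coefficient dict once and reading the contiguous power range top-down with table.get(p, 0).
import Mathlib
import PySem

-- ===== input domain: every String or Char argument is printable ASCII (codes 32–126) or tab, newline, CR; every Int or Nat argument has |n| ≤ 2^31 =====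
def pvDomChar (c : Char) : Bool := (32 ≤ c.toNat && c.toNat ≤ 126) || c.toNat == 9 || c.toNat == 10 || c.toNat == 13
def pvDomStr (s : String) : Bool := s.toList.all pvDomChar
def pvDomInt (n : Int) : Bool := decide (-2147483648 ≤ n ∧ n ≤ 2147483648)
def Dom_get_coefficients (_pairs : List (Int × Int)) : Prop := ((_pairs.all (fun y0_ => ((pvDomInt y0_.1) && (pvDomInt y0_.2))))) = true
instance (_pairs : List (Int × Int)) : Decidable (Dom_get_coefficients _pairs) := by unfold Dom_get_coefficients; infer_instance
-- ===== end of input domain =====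

-- B builds a power→coefficient dict once and maps table.get over the contiguous power range,
-- replacing A's decrementing counter and inner zero-fill while-loop (objective: idiomatic).


-- ===== PORT A =====
-- the inner 'while pair[1] != power_counter' loop; the 'p < pc' guard only makes the
-- recursion total (Python diverges when p > pc; such inputs are outside Pre_)
def whileA (pc p : Int) (acc : List Int) : List Int × Int :=
  if _h : p < pc then whileA (pc - 1) p (acc ++ [0]) else (acc, pc)
termination_by (pc - p).toNat
decreasing_by omega

def loopA : List (Int × Int) → Int → List Int → List Int
  | [], _, acc => acc
  | pair :: rest, pc, acc =>
      let s := whileA pc pair.2 acc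
      loopA rest (s.2 - 1) (s.1 ++ [pair.1])

def get_coefficients (_pairs : List (Int × Int)) : List Int :=
  match _pairs with
  | [] => []          -- Python raises IndexError at _pairs[0][1]; excluded by Pre_
  | hd :: tl => loopA (hd :: tl) hd.2 []

-- ===== PORT B =====
def get_coefficients_alt (_pairs : List (Int × Int)) : List Int :=
  match _pairs with
  | [] => []          -- Python raises IndexError at _pairs[0][1]; excluded by Pre_
  | hd :: tl =>
      let table := (hd :: tl).foldl (fun d cp => d.insert cp.2 cp.1) (PySem.Dict.empty : PySem.Dict Int Int)
      let highest := hd.2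
      let lowest := ((hd :: tl).getLast (by simp)).2
      (PySem.List.pyRange highest (lowest - 1) (-1)).map (fun p => table.getD p 0)

-- ===== PRECONDITION & SPEC =====
-- Pre_ excludes the empty list (A raises IndexError) and lists whose powers are not strictly
-- descending (A's while-loop never terminates there); on every input A returns on, Pre_ holds.
def Pre_get_coefficients (_pairs : List (Int × Int)) : Prop :=
  _pairs ≠ [] ∧ List.Pairwise (fun a b => b.2 < a.2) _pairs
instance (_pairs : List (Int × Int)) : Decidable (Pre_get_coefficients _pairs) := by
  unfold Pre_get_coefficients; infer_instance

def pvWitness_get_coefficients : (List (Int × Int)) := [(3, 4), (-2, 2), (5, 1), (7, -1)]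

def Spec_get_coefficients (_pairs : List (Int × Int)) (out : List Int) : Prop := out = get_coefficients_alt _pairs
instance (_pairs : List (Int × Int)) (out : List Int) : Decidable (Spec_get_coefficients _pairs out) := by unfold Spec_get_coefficients; infer_instance

-- ===== CLAIM (what is proved, stated in full; the proofs are below) =====
def Claim_equal_get_coefficients : Prop := ∀ (_pairs : List (Int × Int)), Dom_get_coefficients _pairs → Pre_get_coefficients _pairs → Spec_get_coefficients _pairs (get_coefficients _pairs)

-- ===== LEMMAS AND PROOFS =====

-- reference shape both programs produce
def dense : Int → List (Int × Int) → List Int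
  | _, [] => []
  | pc, cp :: rest => List.replicate (pc - cp.2).toNat 0 ++ cp.1 :: dense (cp.2 - 1) rest

-- first-match lookup by power
def lookupVal (l : List (Int × Int)) (q : Int) : Int :=
  match l.find? (fun cp => cp.2 == q) with
  | some cp => cp.1
  | none => 0

theorem whileA_spec (pc p : Int) (acc : List Int) (h : p ≤ pc) :
    whileA pc p acc = (acc ++ List.replicate (pc - p).toNat 0, p) := by
  by_cases hlt : p < pc
  · rw [whileA]
    simp only [hlt, dite_true]
    rw [whileA_spec (pc - 1) p _ (by omega)]
    have : (pc - p).toNat = (pc - 1 - p).toNat + 1 := by omega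
    rw [this, List.replicate_succ, List.append_assoc]
    rfl
  · have : p = pc := by omega
    subst this
    rw [whileA]; simp
termination_by (pc - p).toNat
decreasing_by omega

theorem loopA_spec (l : List (Int × Int)) (pc : Int) (acc : List Int)
    (hp : l.Pairwise (fun a b => b.2 < a.2)) (hb : ∀ x ∈ l, x.2 ≤ pc) :
    loopA l pc acc = acc ++ dense pc l := by
  induction l generalizing pc acc with
  | nil => simp [loopA, dense]
  | cons cp rest ih =>
      simp only [loopA]
      rw [whileA_spec pc cp.2 acc (hb cp (by simp))]
      simp only [List.pairwise_cons] at hp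
      rw [ih (hb := fun x hx => by have := hp.1 x hx; omega) (hp := hp.2)]
      simp [dense]

theorem table_notmem (l : List (Int × Int)) (d : PySem.Dict Int Int) (q : Int)
    (h : q ∉ l.map (·.2)) :
    (l.foldl (fun d cp => d.insert cp.2 cp.1) d).getD q 0 = d.getD q 0 := by
  induction l generalizing d with
  | nil => rfl
  | cons cp rest ih =>
      simp only [List.map_cons, List.mem_cons, not_or] at h
      simp only [List.foldl_cons]
      rw [ih _ h.2, PySem.Dict.getD_insert_of_ne _ _ _ h.1]

theorem table_getD (l : List (Int × Int)) (d : PySem.Dict Int Int) (q : Int)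
    (hnd : (l.map (·.2)).Nodup) :
    (l.foldl (fun d cp => d.insert cp.2 cp.1) d).getD q 0 =
      match l.find? (fun cp => cp.2 == q) with
      | some cp => cp.1
      | none => d.getD q 0 := by
  induction l generalizing d with
  | nil => rfl
  | cons cp rest ih =>
      simp only [List.map_cons, List.nodup_cons] at hnd
      simp only [List.foldl_cons, List.find?_cons]
      by_cases hq : cp.2 = q
      · subst hq
        simp only [beq_self_eq_true]
        rw [table_notmem _ _ _ hnd.1, PySem.Dict.getD_insert_self]
      · have : (cp.2 == q) = false := by simp [hq]
        rw [this]
        rw [ih _ hnd.2]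
        cases rest.find? (fun cp => cp.2 == q) with
        | some _ => rfl
        | none => simp [PySem.Dict.getD_insert_of_ne _ _ _ (Ne.symm hq)]

-- splitting a countdown range
theorem pyRange_neg_split (a p b : Int) (h1 : b ≤ p) (h2 : p ≤ a) :
    PySem.List.pyRange a b (-1) = PySem.List.pyRange a p (-1) ++ PySem.List.pyRange p b (-1) := by
  rw [PySem.List.pyRange_neg_one_eq_reverse a b,
      PySem.List.pyRange_one_append (b + 1) (p + 1) (a + 1) (by omega) (by omega),
      List.reverse_append, ← PySem.List.pyRange_neg_one_eq_reverse,
      ← PySem.List.pyRange_neg_one_eq_reverse]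

theorem range_map_lookup (l : List (Int × Int)) (pc : Int) (hne : l ≠ [])
    (hp : l.Pairwise (fun a b => b.2 < a.2)) (hb : ∀ x ∈ l, x.2 ≤ pc) :
    (PySem.List.pyRange pc ((l.getLast hne).2 - 1) (-1)).map (lookupVal l) = dense pc l := by
  induction l generalizing pc with
  | nil => exact absurd rfl hne
  | cons cp rest ih =>
      simp only [List.pairwise_cons] at hp
      have hcp : cp.2 ≤ pc := hb cp (by simp)
      have hlast : ((cp :: rest).getLast hne).2 ≤ cp.2 := by
        cases rest with
        | nil => simp
        | cons y ys =>
            have hgl0 : ((cp :: y :: ys).getLast hne) = (y :: ys).getLast (by simp) :=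
              List.getLast_cons (by simp)
            rw [hgl0]
            have := hp.1 _ (List.getLast_mem (by simp : y :: ys ≠ []))
            omega
      rw [pyRange_neg_split pc cp.2 _ (by omega) hcp,
          PySem.List.pyRange_neg_one_cons (by omega : ((cp :: rest).getLast hne).2 - 1 < cp.2)]
      simp only [List.map_append, List.map_cons]
      have hzeros : (PySem.List.pyRange pc cp.2 (-1)).map (lookupVal (cp :: rest)) =
          List.replicate (pc - cp.2).toNat 0 := by
        have hlen0 : ((PySem.List.pyRange pc cp.2 (-1)).map (lookupVal (cp :: rest))).length
            = (pc - cp.2).toNat := by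
          simp [PySem.List.length_pyRange_neg_one]
        rw [← hlen0]
        apply List.eq_replicate_of_mem
        intro z hz
        simp only [List.mem_map] at hz
        obtain ⟨q, hq, rfl⟩ := hz
        rw [PySem.List.mem_pyRange_neg_one] at hq
        have hfind : (cp :: rest).find? (fun x => x.2 == q) = none := by
          rw [List.find?_eq_none]
          intro x hx
          simp only [List.mem_cons] at hx
          rcases hx with rfl | hx
          · simp; omega
          · have := hp.1 x hx; simp; omega
        simp [lookupVal, hfind]
      have hhead : lookupVal (cp :: rest) cp.2 = cp.1 := by
        simp [lookupVal]
      rw [hzeros, hhead]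
      have hlen : ((PySem.List.pyRange pc cp.2 (-1)).map (lookupVal (cp :: rest))).length
          = (pc - cp.2).toNat := by rw [hzeros]; simp
      cases rest with
      | nil =>
          simp only [List.getLast_singleton]
          rw [PySem.List.pyRange_neg_one_eq_nil (by omega)]
          simp [dense]
      | cons y ys =>
          have hgl : (cp :: y :: ys).getLast hne = (y :: ys).getLast (by simp) :=
            List.getLast_cons (by simp)
          have htail : (PySem.List.pyRange (cp.2 - 1) (((cp :: y :: ys).getLast hne).2 - 1) (-1)).map
              (lookupVal (cp :: y :: ys)) =
              (PySem.List.pyRange (cp.2 - 1) (((y :: ys).getLast (by simp)).2 - 1) (-1)).map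
              (lookupVal (y :: ys)) := by
            rw [hgl]
            apply List.map_congr_left
            intro q hq
            rw [PySem.List.mem_pyRange_neg_one] at hq
            have : (cp.2 == q) = false := by simp; omega
            simp [lookupVal, List.find?_cons, this]
          rw [htail, ih (cp.2 - 1) (by simp) hp.2 (fun x hx => by have := hp.1 x hx; omega)]
          simp [dense]

theorem nodup_powers (l : List (Int × Int)) (hp : l.Pairwise (fun a b => b.2 < a.2)) :
    (l.map (·.2)).Nodup := by
  have : (l.map (fun x : Int × Int => x.2)).Pairwise Ne :=
    List.Pairwise.map (fun x : Int × Int => x.2) (fun a b h => ne_of_gt h) hp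
  exact this

-- ===== VERDICT (by name: the statement is the Claim_ definition above) =====
theorem get_coefficients_spec : Claim_equal_get_coefficients := by
  intro l _ hpre
  obtain ⟨hne, hch⟩ := hpre
  unfold Spec_get_coefficients
  match l, hne with
  | hd :: tl, _ =>
      have hp : (hd :: tl).Pairwise (fun a b => b.2 < a.2) := hch
      have hb : ∀ x ∈ hd :: tl, x.2 ≤ hd.2 := by
        intro x hx
        simp only [List.mem_cons] at hx
        rcases hx with rfl | hx
        · exact le_refl _
        · exact le_of_lt ((List.pairwise_cons.mp hp).1 x hx)
      rw [get_coefficients, get_coefficients_alt]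
      rw [loopA_spec _ _ _ hp hb]
      simp only [List.nil_append]
      have hmap : ∀ q, ((hd :: tl).foldl (fun d cp => d.insert cp.2 cp.1)
          (PySem.Dict.empty : PySem.Dict Int Int)).getD q 0 = lookupVal (hd :: tl) q := by
        intro q
        rw [table_getD _ _ _ (nodup_powers _ hp)]
        unfold lookupVal
        cases (hd :: tl).find? (fun cp => cp.2 == q) with
        | some _ => rfl
        | none => simp [PySem.Dict.getD_empty]
      calc dense hd.2 (hd :: tl)
          = (PySem.List.pyRange hd.2 (((hd :: tl).getLast (by simp)).2 - 1) (-1)).map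
              (lookupVal (hd :: tl)) := (range_map_lookup _ _ _ hp hb).symm
        _ = _ := by
              apply List.map_congr_left
              intro q _
              exact (hmap q).symm
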